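-- pv_equiv track=rewrite | github.com/ShodmonovZafar/qudrat_abdurahimov | tanlangan_masalalar_80/amaliyot_1.py | f18
-- ===== SOURCE A (Python) =====
-- def f18(nums):
--     eng_katta = None
--     index = None
--     for i, e in enumerate(nums):
--         if e % 2 != 0:
--             if eng_katta != None:
--                 if eng_katta < e:
--                     eng_katta = e
--                     index = i
--             else:
--                 eng_katta = e
--                 index = i
--     if eng_katta == None:
--         return 0
--     return eng_katta, index + 1
-- ===== SOURCE B (Python) =====
-- def f18(nums):
--     odds = [e for e in nums if e % 2 != 0]
--     if not odds:
--         return 0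
--     m = max(odds)
--     return m, nums.index(m) + 1
-- ===== Notes on version B (the rewrite author's own statement) =====
-- stated objective: simpler
-- what changed: Replaces A's single accumulator loop (running max with index bookkeeping and None sentinels) by filter-then-max: collect the odd elements, take max, and recover the 1-based position with nums.index (the maximum odd is unique as a value among odds' first occurrence, and evens can never equal it, so index gives A's earliest-index tie rule). Pre_ excludes lists with no odd element, on which A returns the bare int 0 instead of a pair (outside the declared tuple type); B also returns 0 there.
-- outside the precondition, e.g. on f18([2, 4]): A returns 0, B returns 0
import Mathlib
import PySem

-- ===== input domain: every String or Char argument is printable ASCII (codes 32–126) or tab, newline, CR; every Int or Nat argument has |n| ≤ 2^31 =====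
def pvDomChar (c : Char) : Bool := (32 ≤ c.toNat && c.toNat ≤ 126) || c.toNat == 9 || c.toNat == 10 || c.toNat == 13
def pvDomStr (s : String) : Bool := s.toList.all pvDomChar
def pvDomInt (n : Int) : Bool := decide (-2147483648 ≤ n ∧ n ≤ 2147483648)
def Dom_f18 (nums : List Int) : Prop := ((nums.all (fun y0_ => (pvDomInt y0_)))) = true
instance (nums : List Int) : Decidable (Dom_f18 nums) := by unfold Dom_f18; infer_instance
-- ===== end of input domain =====

-- B replaces A's running-max accumulator loop by a filter-odds / max / index decomposition (simpler; same O(n) cost).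

-- ===== PORT A =====
-- the for-loop over enumerate(nums) with state (eng_katta, index)
def f18Loop : List (Int × Int) → Option Int × Option Int → Option Int × Option Int
  | [], st => st
  | (i, e) :: rest, (eng, idx) =>
    f18Loop rest
      (if PySem.Int.mod e 2 ≠ 0 then
        match eng with
        | some m => if m < e then (some e, some i) else (some m, idx)
        | none => (some e, some i)
      else (eng, idx))

def f18 (nums : List Int) : Int × Int :=
  match f18Loop (PySem.List.enumerate nums) (none, none) with
  | (none, _) => (0, 0)          -- Python returns the bare int 0 here; outside Pre_f18
  | (some m, some i) => (m, i + 1)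
  | (some m, none) => (m, 0)     -- unreachable: index is set whenever eng_katta is

-- ===== PORT B =====
def f18_alt (nums : List Int) : Int × Int :=
  let odds := nums.filter (fun e => PySem.Int.mod e 2 != 0)
  match PySem.List.max? odds (fun x => x) with
  | none => (0, 0)               -- Python returns the bare int 0 here; outside Pre_f18
  | some m =>
    match PySem.List.index? nums m with
    | some i => (m, (i : Int) + 1)
    | none => (m, 0)             -- unreachable: m ∈ nums

-- ===== PRECONDITION & SPEC =====
-- Pre_ excludes lists with no odd element, on which the Python A returns the bare int 0 — not a value of the declared pair type (B returns 0 there too).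
def Pre_f18 (nums : List Int) : Prop := ∃ e ∈ nums, PySem.Int.mod e 2 ≠ 0
instance (nums : List Int) : Decidable (Pre_f18 nums) := by unfold Pre_f18; infer_instance
def pvWitness_f18 : List Int := [2, 3]

def Spec_f18 (nums : List Int) (out : Int × Int) : Prop := out = f18_alt nums
instance (nums : List Int) (out : Int × Int) : Decidable (Spec_f18 nums out) := by unfold Spec_f18; infer_instance

-- ===== CLAIM (what is proved, stated in full; the proofs are below) =====
def Claim_equal_f18 : Prop := ∀ (nums : List Int), Dom_f18 nums → Pre_f18 nums → Spec_f18 nums (f18 nums)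

-- ===== LEMMAS AND PROOFS =====

theorem odd_foldl_max (t : List Int) (m : Int) (hm : PySem.Int.mod m 2 ≠ 0) :
    PySem.Int.mod ((t.filter (fun e => PySem.Int.mod e 2 != 0)).foldl max m) 2 ≠ 0 := by
  rcases PySem.List.foldl_max_mem (t.filter (fun e => PySem.Int.mod e 2 != 0)) m with h | h
  · rw [h]; exact hm
  · have := (List.mem_filter.1 h).2
    exact bne_iff_ne.1 this

theorem mem_of_foldl_max_ne (t : List Int) (m : Int)
    (h : (t.filter (fun e => PySem.Int.mod e 2 != 0)).foldl max m ≠ m) :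
    (t.filter (fun e => PySem.Int.mod e 2 != 0)).foldl max m ∈ t := by
  rcases PySem.List.foldl_max_mem (t.filter (fun e => PySem.Int.mod e 2 != 0)) m with h' | h'
  · exact absurd h' h
  · exact (List.mem_filter.1 h').1

theorem f18Loop_some_char (xs : List Int) (s m i : Int)
    (hm : PySem.Int.mod m 2 ≠ 0) :
    f18Loop (PySem.List.enumerate xs s) (some m, some i) =
      (some ((xs.filter (fun e => PySem.Int.mod e 2 != 0)).foldl max m),
        if m < (xs.filter (fun e => PySem.Int.mod e 2 != 0)).foldl max m then
          some (s + (((PySem.List.index? xs ((xs.filter (fun e => PySem.Int.mod e 2 != 0)).foldl max m)).getD 0 : Nat) : Int))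
        else some i) := by
  induction xs generalizing s m i with
  | nil => simp [PySem.List.enumerate, f18Loop]
  | cons x t ih =>
    rw [PySem.List.enumerate_cons]
    simp only [f18Loop]
    by_cases hx : PySem.Int.mod x 2 ≠ 0
    · simp only [if_pos hx]
      have hxb : (PySem.Int.mod x 2 != 0) = true := bne_iff_ne.2 hx
      have hfx : (x :: t).filter (fun e => PySem.Int.mod e 2 != 0)
          = x :: t.filter (fun e => PySem.Int.mod e 2 != 0) := by
        simp only [List.filter_cons, hxb, if_true]
      rw [hfx]
      by_cases hmx : m < x
      · simp only [if_pos hmx]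
        rw [ih (s+1) x s hx]
        set M := (t.filter (fun e => PySem.Int.mod e 2 != 0)).foldl max x with hM
        have hfold : (x :: t.filter (fun e => PySem.Int.mod e 2 != 0)).foldl max m = M := by
          rw [List.foldl_cons, max_eq_right (le_of_lt hmx)]
        rw [hfold]
        have hxM : x ≤ M := (PySem.List.le_foldl_max _ _).1
        have hmM : m < M := lt_of_lt_of_le hmx hxM
        rw [if_pos hmM]
        by_cases hxM' : x < M
        · rw [if_pos hxM']
          have hMne : M ≠ x := ne_of_gt hxM'
          have hMt : M ∈ t := mem_of_foldl_max_ne t x hMne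
          have hidx := PySem.List.index?_cons_of_ne (xs := t) (Ne.symm hMne)
          obtain ⟨k, hk⟩ := Option.isSome_iff_exists.1 ((PySem.List.index?_isSome_iff _ _).2 hMt)
          rw [hidx, hk]
          simp only [Option.map_some, Option.getD_some]
          push_cast; ring_nf
        · rw [if_neg hxM']
          have hMx : M = x := le_antisymm (not_lt.1 hxM') hxM
          rw [hMx, PySem.List.index?_cons_self]
          simp
      · simp only [if_neg hmx]
        rw [ih (s+1) m i hm]
        set M := (t.filter (fun e => PySem.Int.mod e 2 != 0)).foldl max m with hM
        have hfold : (x :: t.filter (fun e => PySem.Int.mod e 2 != 0)).foldl max m = M := by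
          rw [List.foldl_cons, max_eq_left (not_lt.1 hmx)]
        rw [hfold]
        by_cases hmM : m < M
        · rw [if_pos hmM, if_pos hmM]
          have hMne : M ≠ x := by
            intro h
            exact hmx (h ▸ hmM)
          have hMt : M ∈ t := mem_of_foldl_max_ne t m (ne_of_gt hmM)
          have hidx := PySem.List.index?_cons_of_ne (xs := t) (Ne.symm hMne)
          obtain ⟨k, hk⟩ := Option.isSome_iff_exists.1 ((PySem.List.index?_isSome_iff _ _).2 hMt)
          rw [hidx, hk]
          simp only [Option.map_some, Option.getD_some]
          push_cast; ring_nf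
        · rw [if_neg hmM, if_neg hmM]
    · simp only [if_neg hx]
      have hxb : (PySem.Int.mod x 2 != 0) = false := by
        rw [bne_eq_false_iff_eq]
        exact not_ne_iff.1 hx
      have hfx : (x :: t).filter (fun e => PySem.Int.mod e 2 != 0)
          = t.filter (fun e => PySem.Int.mod e 2 != 0) := by
        simp only [List.filter_cons, hxb, Bool.false_eq_true, if_false]
      rw [hfx]
      rw [ih (s+1) m i hm]
      set M := (t.filter (fun e => PySem.Int.mod e 2 != 0)).foldl max m with hM
      by_cases hmM : m < M
      · rw [if_pos hmM, if_pos hmM]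
        have hModM : PySem.Int.mod M 2 ≠ 0 := odd_foldl_max t m hm
        have hMne : M ≠ x := by
          intro h
          rw [h] at hModM
          exact hModM (not_ne_iff.1 hx)
        have hMt : M ∈ t := mem_of_foldl_max_ne t m (ne_of_gt hmM)
        have hidx := PySem.List.index?_cons_of_ne (xs := t) (Ne.symm hMne)
        obtain ⟨k, hk⟩ := Option.isSome_iff_exists.1 ((PySem.List.index?_isSome_iff _ _).2 hMt)
        rw [hidx, hk]
        simp only [Option.map_some, Option.getD_some]
        push_cast; ring_nf
      · rw [if_neg hmM, if_neg hmM]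

theorem f18Loop_none_char (xs : List Int) (s : Int) :
    f18Loop (PySem.List.enumerate xs s) (none, none) =
      match PySem.List.max? (xs.filter (fun e => PySem.Int.mod e 2 != 0)) (fun x => x) with
      | none => (none, none)
      | some M => (some M, some (s + (((PySem.List.index? xs M).getD 0 : Nat) : Int))) := by
  induction xs generalizing s with
  | nil => simp [PySem.List.enumerate, f18Loop, PySem.List.max?]
  | cons x t ih =>
    rw [PySem.List.enumerate_cons]
    simp only [f18Loop]
    by_cases hx : PySem.Int.mod x 2 ≠ 0
    · simp only [if_pos hx]
      have hxb : (PySem.Int.mod x 2 != 0) = true := bne_iff_ne.2 hx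
      have hfx : (x :: t).filter (fun e => PySem.Int.mod e 2 != 0)
          = x :: t.filter (fun e => PySem.Int.mod e 2 != 0) := by
        simp only [List.filter_cons, hxb, if_true]
      rw [f18Loop_some_char t (s+1) x s hx, hfx, PySem.List.max?_id_cons]
      set M := (t.filter (fun e => PySem.Int.mod e 2 != 0)).foldl max x with hM
      have hxM : x ≤ M := (PySem.List.le_foldl_max _ _).1
      by_cases hxM' : x < M
      · rw [if_pos hxM']
        have hMne : M ≠ x := ne_of_gt hxM'
        have hMt : M ∈ t := mem_of_foldl_max_ne t x hMne
        have hidx := PySem.List.index?_cons_of_ne (xs := t) (Ne.symm hMne)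
        obtain ⟨k, hk⟩ := Option.isSome_iff_exists.1 ((PySem.List.index?_isSome_iff _ _).2 hMt)
        simp only [hidx, hk, Option.map_some, Option.getD_some]
        simp only [Prod.mk.injEq, Option.some.injEq, true_and]
        push_cast; ring
      · rw [if_neg hxM']
        have hMx : M = x := le_antisymm (not_lt.1 hxM') hxM
        rw [hMx] at hM ⊢
        simp only [PySem.List.index?_cons_self, Option.getD_some]
        simp
    · simp only [if_neg hx]
      have hxb : (PySem.Int.mod x 2 != 0) = false := by
        rw [bne_eq_false_iff_eq]
        exact not_ne_iff.1 hx
      have hfx : (x :: t).filter (fun e => PySem.Int.mod e 2 != 0)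
          = t.filter (fun e => PySem.Int.mod e 2 != 0) := by
        simp only [List.filter_cons, hxb, Bool.false_eq_true, if_false]
      rw [ih (s+1), hfx]
      cases h : PySem.List.max? (t.filter (fun e => PySem.Int.mod e 2 != 0)) (fun x => x) with
      | none => rfl
      | some M =>
        have hMf : M ∈ t.filter (fun e => PySem.Int.mod e 2 != 0) := PySem.List.max?_mem h
        have hModM : PySem.Int.mod M 2 ≠ 0 := bne_iff_ne.1 (List.mem_filter.1 hMf).2
        have hMt : M ∈ t := (List.mem_filter.1 hMf).1
        have hMne : M ≠ x := by
          intro he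
          rw [he] at hModM
          exact hModM (not_ne_iff.1 hx)
        have hidx := PySem.List.index?_cons_of_ne (xs := t) (Ne.symm hMne)
        obtain ⟨k, hk⟩ := Option.isSome_iff_exists.1 ((PySem.List.index?_isSome_iff _ _).2 hMt)
        simp only [hidx, hk, Option.map_some, Option.getD_some]
        simp only [Prod.mk.injEq, Option.some.injEq, true_and]
        push_cast; ring

theorem f18_eq_alt (nums : List Int) (hpre : Pre_f18 nums) : f18 nums = f18_alt nums := by
  obtain ⟨e, he, hodd⟩ := hpre
  have hef : e ∈ nums.filter (fun e => PySem.Int.mod e 2 != 0) :=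
    List.mem_filter.2 ⟨he, bne_iff_ne.2 hodd⟩
  have hne : nums.filter (fun e => PySem.Int.mod e 2 != 0) ≠ [] := List.ne_nil_of_mem hef
  obtain ⟨M, hmax⟩ : ∃ M, PySem.List.max? (nums.filter (fun e => PySem.Int.mod e 2 != 0)) (fun x => x) = some M := by
    cases h : PySem.List.max? (nums.filter (fun e => PySem.Int.mod e 2 != 0)) (fun x => x) with
    | none => exact absurd ((PySem.List.max?_eq_none_iff _ _).1 h) hne
    | some M => exact ⟨M, rfl⟩
  have hMnums : M ∈ nums := (List.mem_filter.1 (PySem.List.max?_mem hmax)).1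
  obtain ⟨k, hk⟩ := Option.isSome_iff_exists.1 ((PySem.List.index?_isSome_iff _ _).2 hMnums)
  have hloop := f18Loop_none_char nums 0
  rw [hmax] at hloop
  unfold f18 f18_alt
  rw [hloop]
  simp only [hmax, hk, Option.getD_some]
  norm_num

-- ===== VERDICT (by name: the statement is the Claim_ definition above) =====
theorem f18_spec : Claim_equal_f18 := by
  intro nums _ hpre
  unfold Spec_f18
  exact f18_eq_alt nums hpre
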